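-- pv_equiv track=rewrite | github.com/godwillcho/AI-DEPLOY-TEST | steps/stability360-actions/lambda/actions/auto_scoring.py | _map_to_enum
-- ===== SOURCE A (Python) =====
-- def _map_to_enum(value, enum_map, default):
--     """Map a free-text value to the closest enum using case-insensitive lookup."""
--     if not value:
--         return default
--     val = str(value).strip().lower().replace('_', ' ')
--     # Exact match
--     if val in enum_map:
--         return enum_map[val]
--     # Already a valid enum (snake_case)
--     valid_enums = set(enum_map.values())
--     if val.replace(' ', '_') in valid_enums:
--         return val.replace(' ', '_')
--     # Partial match -- longest key contained in value
--     best = None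
--     best_len = 0
--     for key, enum_val in enum_map.items():
--         if key in val and len(key) > best_len:
--             best = enum_val
--             best_len = len(key)
--     return best or default
-- ===== SOURCE B (Python) =====
-- def _map_to_enum(value, enum_map, default):
--     """Map a free-text value to the closest enum using case-insensitive lookup."""
--     if not value:
--         return default
--     val = str(value).strip().lower().replace('_', ' ')
--     # Exact match
--     if val in enum_map:
--         return enum_map[val]
--     # Already a valid enum (snake_case)
--     snake = val.replace(' ', '_')
--     if snake in set(enum_map.values()):
--         return snake
--     # Partial match: first substring key among keys sorted by descending length
--     for key, enum_val in sorted(enum_map.items(), key=lambda kv: len(kv[0]), reverse=True):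
--         if key and key in val:
--             return enum_val or default
--     return default
-- ===== Notes on version B (the rewrite author's own statement) =====
-- stated objective: alternative
-- what changed: The partial-match phase no longer tracks a running best/best_len accumulator over all dict items; B iterates the items stably sorted by descending key length and returns at the first nonempty key that is a substring of the value (same exact-lookup and snake_case phases, same truthiness fallback to default).
import Mathlib
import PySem

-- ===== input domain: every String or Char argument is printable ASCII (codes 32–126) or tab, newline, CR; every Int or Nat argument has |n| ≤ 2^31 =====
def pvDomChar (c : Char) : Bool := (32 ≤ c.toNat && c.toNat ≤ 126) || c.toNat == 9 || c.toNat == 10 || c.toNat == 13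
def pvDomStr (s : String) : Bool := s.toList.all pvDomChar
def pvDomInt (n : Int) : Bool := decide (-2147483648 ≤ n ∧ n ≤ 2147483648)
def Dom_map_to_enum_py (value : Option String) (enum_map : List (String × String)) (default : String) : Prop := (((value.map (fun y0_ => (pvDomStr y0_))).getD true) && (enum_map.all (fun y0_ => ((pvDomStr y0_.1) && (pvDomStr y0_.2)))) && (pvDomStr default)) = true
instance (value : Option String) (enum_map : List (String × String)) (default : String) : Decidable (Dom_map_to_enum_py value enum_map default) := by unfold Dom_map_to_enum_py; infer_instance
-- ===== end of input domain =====

-- B replaces A's running best/best_len accumulator scan of the partial-match phase by a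
-- first-match scan over the items stably sorted by descending key length (same results; objective: alternative).

-- ===== PORT A =====
def map_to_enum_py (value : Option String) (enum_map : List (String × String)) (default : String) : String :=
  match value with
  | none => default
  | some s =>
    if s = "" then default
    else
      let val := PySem.Str.replace (PySem.Str.lower (PySem.Str.strip s)) "_" " "
      let d : PySem.Dict String String := PySem.Dict.ofList enum_map
      match PySem.Dict.get? d val with
      | some e => e
      | none =>
        let validEnums : PySem.Set String := PySem.Set.ofList (PySem.Dict.values d)
        if PySem.Set.contains validEnums (PySem.Str.replace val " " "_") then
          PySem.Str.replace val " " "_"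
        else
          let r := (PySem.Dict.items d).foldl
            (fun (b : Option String × Int) kv =>
              if PySem.Str.isIn kv.1 val && decide (b.2 < PySem.Str.len kv.1)
              then (some kv.2, PySem.Str.len kv.1) else b) (none, 0)
          match r.1 with
          | some b => if b = "" then default else b
          | none => default

-- ===== PORT B =====
-- B's loop: return the first (nonempty) substring key's enum value, iterating in
-- descending-key-length (stable) order; `enum_val or default` truthiness at the return.
def pvFirstMatch (items : List (String × String)) (val : String) (default : String) : String :=
  match items with
  | [] => default
  | kv :: rest =>
    if !(kv.1 == "") && PySem.Str.isIn kv.1 val then (if kv.2 = "" then default else kv.2)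
    else pvFirstMatch rest val default

def map_to_enum_py_alt (value : Option String) (enum_map : List (String × String)) (default : String) : String :=
  match value with
  | none => default
  | some s =>
    if s = "" then default
    else
      let val := PySem.Str.replace (PySem.Str.lower (PySem.Str.strip s)) "_" " "
      let d : PySem.Dict String String := PySem.Dict.ofList enum_map
      match PySem.Dict.get? d val with
      | some e => e
      | none =>
        let snake := PySem.Str.replace val " " "_"
        if PySem.Set.contains (PySem.Set.ofList (PySem.Dict.values d)) snake then snake
        else
          pvFirstMatch (PySem.List.sorted (PySem.Dict.items d) (fun kv => PySem.Str.len kv.1) true)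
            val default

-- ===== PRECONDITION & SPEC =====
def Spec_map_to_enum_py (value : Option String) (enum_map : List (String × String)) (default : String) (out : String) : Prop := out = map_to_enum_py_alt value enum_map default
instance (value : Option String) (enum_map : List (String × String)) (default : String) (out : String) : Decidable (Spec_map_to_enum_py value enum_map default out) := by unfold Spec_map_to_enum_py; infer_instance

-- ===== CLAIM (what is proved, stated in full; the proofs are below) =====
def Claim_equal_map_to_enum_py : Prop := ∀ (value : Option String) (enum_map : List (String × String)) (default : String), Dom_map_to_enum_py value enum_map default → Spec_map_to_enum_py value enum_map default (map_to_enum_py value enum_map default)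

-- ===== LEMMAS AND PROOFS =====

-- the first max-length element (from the left) of a list of items
def pvPick (l : List (String × String)) : Option (String × String) :=
  match l with
  | [] => none
  | x :: t =>
    match pvPick t with
    | none => some x
    | some m => if PySem.Str.len x.1 < PySem.Str.len m.1 then some m else some x

-- combine two candidates, preferring the first on ties
def pvCombine (g m : Option (String × String)) : Option (String × String) :=
  match g, m with
  | none, o => o
  | some g, none => some g
  | some g, some m => if PySem.Str.len g.1 < PySem.Str.len m.1 then some m else some g

lemma pvCombine_none_right (g : Option (String × String)) : pvCombine g none = g := by
  cases g <;> rfl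

lemma pvCombine_assoc (a b c : Option (String × String)) :
    pvCombine (pvCombine a b) c = pvCombine a (pvCombine b c) := by
  cases a with
  | none => rfl
  | some x =>
    cases b with
    | none => cases c <;> rfl
    | some y =>
      cases c with
      | none => rw [pvCombine_none_right, pvCombine_none_right]
      | some z =>
        by_cases h1 : x.1.length < y.1.length
        · rw [show pvCombine (some x) (some y) = some y from by simp [pvCombine, h1]]
          by_cases h2 : y.1.length < z.1.length
          · rw [show pvCombine (some y) (some z) = some z from by simp [pvCombine, h2]]
            have h3 : x.1.length < z.1.length := by omega
            simp [pvCombine, h3]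
          · rw [show pvCombine (some y) (some z) = some y from by simp [pvCombine, h2]]
            simp [pvCombine, h1]
        · rw [show pvCombine (some x) (some y) = some x from by simp [pvCombine, h1]]
          by_cases h2 : y.1.length < z.1.length
          · rw [show pvCombine (some y) (some z) = some z from by simp [pvCombine, h2]]
          · rw [show pvCombine (some y) (some z) = some y from by simp [pvCombine, h2]]
            have h3 : ¬ x.1.length < z.1.length := by omega
            simp [pvCombine, h1, h3]

lemma pvPick_cons (x : String × String) (t : List (String × String)) :
    pvPick (x :: t) = pvCombine (some x) (pvPick t) := by
  cases h : pvPick t <;> simp [pvPick, pvCombine, h]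

lemma str_len_pos (s : String) (h : s ≠ "") : 0 < PySem.Str.len s := by
  rw [PySem.Str.len_eq]
  exact_mod_cast List.length_pos_iff.mpr (fun hn => h (String.toList_eq_nil_iff.mp hn))

lemma pairwise_insertBy (x : String × String) (acc : List (String × String))
    (h : acc.Pairwise (fun a b => PySem.Str.len b.1 ≤ PySem.Str.len a.1)) :
    (PySem.List.insertBy (fun a b => decide (PySem.Str.len b.1 < PySem.Str.len a.1)) x acc).Pairwise
      (fun a b => PySem.Str.len b.1 ≤ PySem.Str.len a.1) := by
  induction acc with
  | nil => simp [PySem.List.insertBy]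
  | cons y t ih =>
    rw [PySem.List.insertBy]
    rcases h with - | ⟨hy, ht⟩
    by_cases hlt : PySem.Str.len y.1 < PySem.Str.len x.1
    · simp only [hlt, decide_true, if_true]
      constructor
      · intro z hz
        rcases List.mem_cons.mp hz with rfl | hz
        · omega
        · have := hy z hz; omega
      · exact List.Pairwise.cons hy ht
    · simp only [hlt, decide_false, Bool.false_eq_true, if_false]
      constructor
      · intro z hz
        rw [PySem.List.mem_insertBy] at hz
        rcases hz with rfl | hz
        · omega
        · exact hy z hz
      · exact ih ht

lemma find?_insertBy (p : (String × String) → Bool) (x : String × String)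
    (acc : List (String × String))
    (h : acc.Pairwise (fun a b => PySem.Str.len b.1 ≤ PySem.Str.len a.1)) :
    List.find? p (PySem.List.insertBy (fun a b => decide (PySem.Str.len b.1 < PySem.Str.len a.1)) x acc)
      = pvCombine (List.find? p acc) (if p x then some x else none) := by
  induction acc with
  | nil =>
    by_cases hx : p x <;> simp [PySem.List.insertBy, List.find?, hx, pvCombine]
  | cons y t ih =>
    rw [PySem.List.insertBy]
    rcases h with - | ⟨hy, ht⟩
    by_cases hlt : PySem.Str.len y.1 < PySem.Str.len x.1
    · simp only [hlt, decide_true, if_true]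
      by_cases hx : p x
      · rw [List.find?_cons_of_pos hx]
        simp only [hx, if_true]
        cases hg : List.find? p (y :: t) with
        | none => rfl
        | some g =>
          have hmem := List.mem_of_find?_eq_some hg
          have hgle : PySem.Str.len g.1 ≤ PySem.Str.len y.1 := by
            rcases List.mem_cons.mp hmem with h' | h'
            · rw [h']
            · exact hy g h'
          simp only [pvCombine]
          rw [if_pos (by omega)]
      · rw [List.find?_cons_of_neg (by simp [hx])]
        simp [hx, pvCombine_none_right]
    · simp only [hlt, decide_false, Bool.false_eq_true, if_false]
      by_cases hpy : p y
      · rw [List.find?_cons_of_pos hpy, List.find?_cons_of_pos hpy]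
        by_cases hx : p x
        · simp only [hx, if_true, pvCombine]
          rw [if_neg (by omega)]
        · simp [hx, pvCombine_none_right]
      · rw [List.find?_cons_of_neg (by simp [hpy]), List.find?_cons_of_neg (by simp [hpy])]
        exact ih ht

lemma foldl_ins_find (p : (String × String) → Bool) :
    ∀ (l acc : List (String × String)),
      acc.Pairwise (fun a b => PySem.Str.len b.1 ≤ PySem.Str.len a.1) →
      List.find? p (l.foldl
          (fun acc x => PySem.List.insertBy (fun a b => decide (PySem.Str.len b.1 < PySem.Str.len a.1)) x acc) acc)
        = pvCombine (List.find? p acc) (pvPick (l.filter p)) := by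
  intro l
  induction l with
  | nil => intro acc h; simp [pvPick, pvCombine_none_right]
  | cons x t ih =>
    intro acc h
    rw [List.foldl_cons, ih _ (pairwise_insertBy x acc h), find?_insertBy p x acc h]
    rw [pvCombine_assoc]
    congr 1
    by_cases hx : p x
    · rw [List.filter_cons_of_pos hx, pvPick_cons]
      simp [hx]
    · rw [List.filter_cons_of_neg (by simp [hx])]
      simp [hx, pvCombine]

lemma find?_sorted (p : (String × String) → Bool) (l : List (String × String)) :
    List.find? p (PySem.List.sorted l (fun kv => PySem.Str.len kv.1) true) = pvPick (l.filter p) := by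
  rw [PySem.List.sorted_rev_eq_foldl_insertBy, foldl_ins_find p l [] (by simp)]
  rfl

lemma pvFirstMatch_eq_find? (L : List (String × String)) (val default : String) :
    pvFirstMatch L val default =
      match List.find? (fun kv => !(kv.1 == "") && PySem.Str.isIn kv.1 val) L with
      | none => default
      | some m => if m.2 = "" then default else m.2 := by
  induction L with
  | nil => rfl
  | cons kv rest ih =>
    rw [pvFirstMatch, List.find?_cons]
    cases hc : (!(kv.1 == "") && PySem.Str.isIn kv.1 val) with
    | true => rfl
    | false => exact ih

lemma foldA_eq_pick (val : String) (l : List (String × String)) :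
    l.foldl
        (fun (b : Option String × Int) kv =>
          if PySem.Str.isIn kv.1 val && decide (b.2 < PySem.Str.len kv.1)
          then (some kv.2, PySem.Str.len kv.1) else b) (none, 0)
      = match pvPick (l.filter (fun kv => !(kv.1 == "") && PySem.Str.isIn kv.1 val)) with
        | none => (none, 0)
        | some m => (some m.2, PySem.Str.len m.1) := by
  induction l using List.reverseRecOn with
  | nil => rfl
  | append_singleton l x ih =>
    rw [List.foldl_append, List.foldl_cons, List.foldl_nil, ih, List.filter_append]
    by_cases hgood : (!(x.1 == "") && PySem.Str.isIn x.1 val) = true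
    · have hne : x.1 ≠ "" := by simpa using (Bool.and_elim_left hgood)
      have hin : PySem.Str.isIn x.1 val = true := Bool.and_elim_right hgood
      have hpos := str_len_pos x.1 hne
      have hinC : PySem.Chars.isIn x.1.toList val.toList = true := by simpa using hin
      have hposN : 0 < x.1.length := by
        have := str_len_pos x.1 hne
        rw [PySem.Str.len_eq] at this
        simpa using this
      have hfx : List.filter (fun kv => !(kv.1 == "") && PySem.Str.isIn kv.1 val) [x] = [x] := by
        simp [hne, hinC]
      rw [hfx]
      cases hp : pvPick (l.filter (fun kv => !(kv.1 == "") && PySem.Str.isIn kv.1 val)) with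
      | none =>
        have : pvPick (l.filter (fun kv => !(kv.1 == "") && PySem.Str.isIn kv.1 val) ++ [x])
            = pvCombine (pvPick (l.filter (fun kv => !(kv.1 == "") && PySem.Str.isIn kv.1 val))) (some x) := by
          clear hp
          induction l.filter (fun kv => !(kv.1 == "") && PySem.Str.isIn kv.1 val) with
          | nil => rfl
          | cons y t iht => rw [List.cons_append, pvPick_cons, iht, pvPick_cons, pvCombine_assoc]
        rw [this, hp]
        simp [pvCombine, hinC, hposN]
      | some m =>
        have : pvPick (l.filter (fun kv => !(kv.1 == "") && PySem.Str.isIn kv.1 val) ++ [x])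
            = pvCombine (pvPick (l.filter (fun kv => !(kv.1 == "") && PySem.Str.isIn kv.1 val))) (some x) := by
          clear hp
          induction l.filter (fun kv => !(kv.1 == "") && PySem.Str.isIn kv.1 val) with
          | nil => rfl
          | cons y t iht => rw [List.cons_append, pvPick_cons, iht, pvPick_cons, pvCombine_assoc]
        rw [this, hp]
        by_cases hltN : m.1.length < x.1.length
        · have h1 : PySem.Str.len m.1 < PySem.Str.len x.1 := by
            simp only [PySem.Str.len_eq]; exact_mod_cast hltN
          simp [pvCombine, hinC, hltN]
        · have h1 : ¬ PySem.Str.len m.1 < PySem.Str.len x.1 := by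
            simp only [PySem.Str.len_eq]; exact_mod_cast hltN
          simp [pvCombine, hinC, hltN]
    · have hbad : (!(x.1 == "") && PySem.Str.isIn x.1 val) = false := by
        simpa using hgood
      have hfx : List.filter (fun kv => !(kv.1 == "") && PySem.Str.isIn kv.1 val) [x] = [] := by
        rcases Bool.and_eq_false_iff.mp hbad with h | h
        · have hx1 : x.1 = "" := by simpa using h
          simp [hx1]
        · have hC : PySem.Chars.isIn x.1.toList val.toList = false := by simpa using h
          simp [hC]
      rw [hfx, List.append_nil]
      by_cases hin : PySem.Str.isIn x.1 val = true
      · -- then x.1 = "" so len x.1 = 0, and the running best_len (0 or a positive len) never drops below it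
        have hx1 : x.1 = "" := by
          by_contra hne
          exact hgood (by simp [hne]; simpa using hin)
        have hlen : PySem.Str.len x.1 = 0 := by rw [hx1]; rfl
        cases hp : pvPick (l.filter (fun kv => !(kv.1 == "") && PySem.Str.isIn kv.1 val)) with
        | none => simp [hx1]
        | some m => simp [hx1]
      · have hinC : PySem.Chars.isIn x.1.toList val.toList = false := by
          rw [Bool.not_eq_true] at hin
          simpa using hin
        simp [hinC]

lemma partial_phase_eq (val default : String) (l : List (String × String)) :
    (match (l.foldl
        (fun (b : Option String × Int) kv =>
          if PySem.Str.isIn kv.1 val && decide (b.2 < PySem.Str.len kv.1)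
          then (some kv.2, PySem.Str.len kv.1) else b) (none, 0)).1 with
      | some b => if b = "" then default else b
      | none => default)
    = pvFirstMatch (PySem.List.sorted l (fun kv => PySem.Str.len kv.1) true) val default := by
  rw [foldA_eq_pick, pvFirstMatch_eq_find?, find?_sorted]
  cases pvPick (l.filter (fun kv => !(kv.1 == "") && PySem.Str.isIn kv.1 val)) <;> rfl

-- ===== VERDICT (by name: the statement is the Claim_ definition above) =====
theorem map_to_enum_py_spec : Claim_equal_map_to_enum_py := by
  intro value enum_map default _
  unfold Spec_map_to_enum_py
  cases value with
  | none => rfl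
  | some s =>
    by_cases hs : s = ""
    · simp [map_to_enum_py, map_to_enum_py_alt, hs]
    · simp only [map_to_enum_py, map_to_enum_py_alt, if_neg hs]
      cases hg : PySem.Dict.get? (PySem.Dict.ofList enum_map)
          (PySem.Str.replace (PySem.Str.lower (PySem.Str.strip s)) "_" " ") with
      | some e => rfl
      | none =>
        split_ifs with hv
        · rfl
        · exact partial_phase_eq _ default _
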